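-- pv_equiv track=rewrite | github.com/BOBBLE22/Number-1 | main.py | warmest_temperature
-- ===== SOURCE A (Python) =====
-- def warmest_temperature(periods: list) -> dict:
--     """Returns the period with the warmest temperature
--     :param periods: a list of weather data periods, :return: the period with the warmest temperature"""
--     if not periods:
--         return {}
--     temperatures = [period.get("temperature") for period in periods]
--     temp_check1 = list(filter(lambda temp: temp is not None, temperatures))
--     if not temp_check1:
--         return {}
--     max_temp = temperatures.index(max(temp_check1))
--     return periods[max_temp]
-- ===== SOURCE B (Python) =====
-- def warmest_temperature(periods: list) -> dict:
--     """Returns the period with the warmest temperature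
--     :param periods: a list of weather data periods, :return: the period with the warmest temperature"""
--     best_period = None
--     best_temp = None
--     for period in periods:
--         t = period.get("temperature")
--         if t is None:
--             continue
--         if best_temp is None or t > best_temp:
--             best_temp = t
--             best_period = period
--     return best_period if best_period is not None else {}
-- ===== Notes on version B (the rewrite author's own statement) =====
-- stated objective: simpler
-- what changed: Replaced A's four-pass pipeline (build temperature list, filter out None, max, index back into the list) by a single accumulator loop that tracks the best period and best temperature, keeping the first period on ties via a strict comparison.
import Mathlib
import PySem

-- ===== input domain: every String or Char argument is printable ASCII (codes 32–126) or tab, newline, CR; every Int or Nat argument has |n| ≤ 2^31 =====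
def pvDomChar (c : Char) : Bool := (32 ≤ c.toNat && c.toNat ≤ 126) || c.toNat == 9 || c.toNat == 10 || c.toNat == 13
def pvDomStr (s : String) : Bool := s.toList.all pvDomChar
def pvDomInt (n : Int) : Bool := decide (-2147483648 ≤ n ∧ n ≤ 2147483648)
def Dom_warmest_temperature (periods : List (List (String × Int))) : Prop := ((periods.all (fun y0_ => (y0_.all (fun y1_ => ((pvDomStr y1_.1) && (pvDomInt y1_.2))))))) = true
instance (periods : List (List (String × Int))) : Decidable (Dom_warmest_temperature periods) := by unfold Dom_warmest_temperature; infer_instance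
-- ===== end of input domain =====

-- B replaces A's build-list/filter/max/index pipeline by a single accumulator pass over the periods (objective: simpler, one pass).

-- ===== PORT A =====
def warmest_temperature (periods : List (List (String × Int))) : List (String × Int) :=
  if periods = [] then []
  else
    let temperatures := periods.map (fun period => PySem.Dict.get? (PySem.Dict.ofList period) "temperature")
    let temp_check1 := temperatures.filterMap id          -- filter(lambda temp: temp is not None, ...): the non-None values
    if temp_check1 = [] then []
    else
      match PySem.List.max? temp_check1 (fun x => x) with
      | none => []                                        -- unreachable: temp_check1 ≠ []
      | some m =>
        match PySem.List.index? temperatures (some m) with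
        | none => []                                      -- unreachable: m comes from temperatures
        | some i =>
          match PySem.List.pyGet? periods (i : Int) with
          | none => []                                    -- unreachable: i < len(periods)
          | some p => p

-- ===== PORT B =====
def warmest_temperature_alt (periods : List (List (String × Int))) : List (String × Int) :=
  let r := periods.foldl
    (fun acc period =>
      match PySem.Dict.get? (PySem.Dict.ofList period) "temperature" with
      | none => acc
      | some t =>
        match acc.2 with
        | none => (some period, some t)
        | some b => if t > b then (some period, some t) else acc)
    ((none, none) : Option (List (String × Int)) × Option Int)
  match r.1 with
  | some p => p
  | none => []

-- ===== PRECONDITION & SPEC =====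
def Spec_warmest_temperature (periods : List (List (String × Int))) (out : List (String × Int)) : Prop := out = warmest_temperature_alt periods
instance (periods : List (List (String × Int))) (out : List (String × Int)) : Decidable (Spec_warmest_temperature periods out) := by unfold Spec_warmest_temperature; infer_instance

-- ===== CLAIM (what is proved, stated in full; the proofs are below) =====
def Claim_equal_warmest_temperature : Prop := ∀ (periods : List (List (String × Int))), Dom_warmest_temperature periods → Spec_warmest_temperature periods (warmest_temperature periods)

-- ===== LEMMAS AND PROOFS =====

-- shared spec of "first period with the maximal temperature, and that temperature"
def pvBest : List (List (String × Int)) → Option ((List (String × Int)) × Int)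
  | [] => none
  | p :: xs =>
    match PySem.Dict.get? (PySem.Dict.ofList p) "temperature", pvBest xs with
    | none, r => r
    | some t, none => some (p, t)
    | some t, some (q, u) => if u > t then some (q, u) else some (p, t)

def pvStep (acc : Option (List (String × Int)) × Option Int) (period : List (String × Int)) :
    Option (List (String × Int)) × Option Int :=
  match PySem.Dict.get? (PySem.Dict.ofList period) "temperature" with
  | none => acc
  | some t =>
    match acc.2 with
    | none => (some period, some t)
    | some b => if t > b then (some period, some t) else acc

theorem pvFold_some (xs : List (List (String × Int))) (p : List (String × Int)) (t : Int) :
    xs.foldl pvStep (some p, some t) =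
      match pvBest xs with
      | none => (some p, some t)
      | some (q, u) => if u > t then (some q, some u) else (some p, some t) := by
  induction xs generalizing p t with
  | nil => simp [pvBest]
  | cons x xs ih =>
    simp only [List.foldl_cons, pvStep, pvBest]
    cases hx : PySem.Dict.get? (PySem.Dict.ofList x) "temperature" with
    | none => simp [ih]
    | some s =>
      simp only
      by_cases hst : s > t
      · simp only [if_pos hst, ih x s]
        cases hb : pvBest xs with
        | none => simp; exact fun h => absurd hst (by omega)
        | some qu =>
          obtain ⟨q, u⟩ := qu
          by_cases h1 : u > s <;> by_cases h2 : u > t <;> simp [h1, h2] <;> omega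
      · simp only [if_neg hst, ih p t]
        cases hb : pvBest xs with
        | none => simp; omega
        | some qu =>
          obtain ⟨q, u⟩ := qu
          by_cases h1 : u > s <;> by_cases h2 : u > t <;> simp [h1, h2] <;> omega

theorem pvFold_none (xs : List (List (String × Int))) :
    xs.foldl pvStep (none, none) =
      match pvBest xs with
      | none => (none, none)
      | some (q, u) => (some q, some u) := by
  cases xs with
  | nil => simp [pvBest]
  | cons x xs =>
    simp only [List.foldl_cons, pvStep, pvBest]
    cases hx : PySem.Dict.get? (PySem.Dict.ofList x) "temperature" with
    | none =>
      simp only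
      induction xs with
      | nil => simp [pvBest]
      | cons y ys ih =>
        simp only [List.foldl_cons, pvStep, pvBest]
        cases hy : PySem.Dict.get? (PySem.Dict.ofList y) "temperature" with
        | none => simpa using ih
        | some s =>
          simp only [pvFold_some]
          cases hb : pvBest ys with
          | none => simp
          | some qu =>
            obtain ⟨q, u⟩ := qu
            by_cases h1 : u > s <;> simp [h1]
    | some s =>
      simp only [pvFold_some]
      cases hb : pvBest xs with
      | none => simp
      | some qu =>
        obtain ⟨q, u⟩ := qu
        by_cases h1 : u > s <;> simp [h1]

theorem alt_eq_pvBest (periods : List (List (String × Int))) :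
    warmest_temperature_alt periods =
      match pvBest periods with
      | none => []
      | some (q, _) => q := by
  show (match (periods.foldl pvStep (none, none)).1 with
        | some p => p | none => []) = _
  rw [pvFold_none]
  cases hb : pvBest periods with
  | none => simp
  | some qu => obtain ⟨q, u⟩ := qu; simp

theorem maxCons (t u : Int) (L : List Int) (hu : u ∈ L) (hb : ∀ y ∈ L, y ≤ u) :
    PySem.List.max? (t :: L) (fun x => x) = some (max t u) := by
  cases h : PySem.List.max? (t :: L) (fun x => x) with
  | none => exact absurd ((PySem.List.max?_eq_none_iff _ _).mp h) (by simp)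
  | some m =>
    have hm := PySem.List.max?_mem h
    have hmax := PySem.List.max?_isMax h
    have h1 : t ≤ m := hmax t (by simp)
    have h2 : u ≤ m := hmax u (by simp [hu])
    have h3 : m ≤ max t u := by
      rcases List.mem_cons.mp hm with rfl | hm'
      · exact le_max_left _ _
      · exact le_trans (hb _ hm') (le_max_right _ _)
    have : m = max t u := le_antisymm h3 (max_le h1 h2)
    simp [this]

theorem maxSingle (t : Int) : PySem.List.max? [t] (fun x => x) = some t := by
  rw [PySem.List.max?_id_cons]; simp

theorem pvA_main (xs : List (List (String × Int))) :
    match pvBest xs with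
    | none => (xs.map (fun p => PySem.Dict.get? (PySem.Dict.ofList p) "temperature")).filterMap id = []
    | some (q, u) =>
        PySem.List.max? ((xs.map (fun p => PySem.Dict.get? (PySem.Dict.ofList p) "temperature")).filterMap id) (fun x => x) = some u ∧
        ∃ i, PySem.List.index? (xs.map (fun p => PySem.Dict.get? (PySem.Dict.ofList p) "temperature")) (some u) = some i ∧
             PySem.List.pyGet? xs (i : Int) = some q := by
  induction xs with
  | nil => simp [pvBest]
  | cons p xs ih =>
    simp only [pvBest, List.map_cons, List.filterMap_cons]
    cases hp : PySem.Dict.get? (PySem.Dict.ofList p) "temperature" with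
    | none =>
      simp only [id]
      cases hb : pvBest xs with
      | none => rw [hb] at ih; simpa using ih
      | some qu =>
        obtain ⟨q, u⟩ := qu
        rw [hb] at ih
        obtain ⟨hmax, i, hidx, hget⟩ := ih
        refine ⟨hmax, i + 1, ?_, ?_⟩
        · rw [PySem.List.index?_cons_of_ne _ (by simp), hidx]; rfl
        · push_cast
          rw [PySem.List.pyGet?_cons_succ]; exact hget
    | some t =>
      simp only [id]
      cases hb : pvBest xs with
      | none =>
        rw [hb] at ih
        simp only [id] at ih ⊢
        refine ⟨?_, 0, ?_, ?_⟩
        · rw [ih]; exact maxSingle t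
        · exact PySem.List.index?_cons_self _ _
        · exact PySem.List.pyGet?_zero_cons _ _
      | some qu =>
        obtain ⟨q, u⟩ := qu
        rw [hb] at ih
        simp only [id] at ih
        obtain ⟨hmax, i, hidx, hget⟩ := ih
        have hu : u ∈ (xs.map (fun p => PySem.Dict.get? (PySem.Dict.ofList p) "temperature")).filterMap (fun x => x) :=
          PySem.List.max?_mem hmax
        have hub : ∀ y ∈ (xs.map (fun p => PySem.Dict.get? (PySem.Dict.ofList p) "temperature")).filterMap (fun x => x), y ≤ u :=
          fun y hy => PySem.List.max?_isMax hmax y hy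
        have hmx := maxCons t u _ hu hub
        by_cases hut : u > t
        · simp only [if_pos hut]
          refine ⟨?_, i + 1, ?_, ?_⟩
          · rw [hmx, max_eq_right (le_of_lt hut)]
          · rw [PySem.List.index?_cons_of_ne _ (by simp; omega), hidx]; rfl
          · push_cast
            rw [PySem.List.pyGet?_cons_succ]; exact hget
        · simp only [if_neg hut]
          refine ⟨?_, 0, ?_, ?_⟩
          · rw [hmx, max_eq_left (by omega)]
          · exact PySem.List.index?_cons_self _ _
          · exact PySem.List.pyGet?_zero_cons _ _

theorem warmest_temperature_spec : Claim_equal_warmest_temperature := by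
  intro periods _
  show warmest_temperature periods = warmest_temperature_alt periods
  rw [alt_eq_pvBest]
  by_cases hne : periods = []
  · subst hne; simp [warmest_temperature, pvBest]
  · have H := pvA_main periods
    simp only [warmest_temperature, if_neg hne]
    cases hb : pvBest periods with
    | none =>
      rw [hb] at H
      rw [if_pos H]
    | some qu =>
      obtain ⟨q, u⟩ := qu
      rw [hb] at H
      obtain ⟨hmax, i, hidx, hget⟩ := H
      have hne2 : (periods.map (fun period => PySem.Dict.get? (PySem.Dict.ofList period) "temperature")).filterMap id ≠ [] := by
        intro h
        rw [h] at hmax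
        simp [(PySem.List.max?_eq_none_iff ([] : List Int) (fun x => x)).mpr rfl] at hmax
      simp only [if_neg hne2, hmax, hidx, hget]
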